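-- pv_equiv track=rewrite | github.com/lauraksluk/15112 | hw3.py | decodeColumnShuffleCipher
-- ===== SOURCE A (Python) =====
-- def decodeColumnShuffleCipher(message):
--     key = ''
--     for i in range(len(message)):
--         if message[i].isdigit():
--             key += message[i]
--     code = message[len(key)::]
--     lenC = len(code)
--     lenK = len(key)
--     temp = ''
--     for j in range (0, lenC, lenC//lenK):
--         temp += code[j:(j+lenC//lenK)] + '\n'
--     temp = temp.splitlines()
--     s = ''
--     for j in range(lenK):
--         index = key.find(str(j))
--         s += temp[index]
--     result = ''
--     for k in range(len(s)//lenK):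
--         result += s[k::len(s)//lenK]
--     result = result.replace('-','')
--     return result
-- ===== SOURCE B (Python) =====
-- def decodeColumnShuffleCipher(message):
--     key = ''.join(ch for ch in message if ch.isdigit())
--     code = message[len(key):]
--     w = len(code) // len(key)
--     cols = [code[j:j + w] for j in range(0, len(code), w)]
--     s = ''.join(cols[key.find(str(j))] for j in range(len(key)))
--     r = len(s) // len(key)
--     order = sorted(range(len(s)), key=lambda p: (p % r, p // r))
--     return ''.join(s[p] for p in order if s[p] != '-')
-- ===== Notes on version B (the rewrite author's own statement) =====
-- stated objective: alternative
-- what changed: B replaces A's newline-join-then-splitlines chunking with a direct list of column slices and replaces A's strided-slice transpose loop (s[k::R] for each k) with a single sort of the positions by the key (p % R, p // R), filtering '-' during the final join instead of a replace pass.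
-- outside the precondition, e.g. on decodeColumnShuffleCipher('10ab\ncd'): A returns 'ab', B returns '\nacb'; on decodeColumnShuffleCipher('-'): A raises ZeroDivisionError, B raises ZeroDivisionError
import Mathlib
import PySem

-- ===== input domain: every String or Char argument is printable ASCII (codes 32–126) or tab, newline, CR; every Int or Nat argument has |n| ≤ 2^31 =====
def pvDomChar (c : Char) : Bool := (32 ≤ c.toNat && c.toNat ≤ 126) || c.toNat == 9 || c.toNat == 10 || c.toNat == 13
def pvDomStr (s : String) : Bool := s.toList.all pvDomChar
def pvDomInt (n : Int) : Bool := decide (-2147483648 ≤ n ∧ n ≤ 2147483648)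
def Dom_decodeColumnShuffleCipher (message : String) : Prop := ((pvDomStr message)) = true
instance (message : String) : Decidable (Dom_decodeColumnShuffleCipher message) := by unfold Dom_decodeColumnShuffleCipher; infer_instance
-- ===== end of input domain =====

-- B replaces A's splitlines-based chunking by direct column slices and A's strided-slice
-- transpose loop by one sort of the positions by key (p % R, p // R); equivalence is proved
-- on Pre_ (at least one digit, message at least twice the key length, no '\n'/'\r').

-- ===== PORT A =====
-- literal port of A; strings handled as their char lists (message[i]-indexed loop = fold over chars)
def decodeColumnShuffleCipher (message : String) : String :=
  let cs := message.toList
  -- key = ''; for i in range(len(message)): if message[i].isdigit(): key += message[i]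
  let key : List Char := cs.foldl (fun key c => if PySem.Chars.isdigit c then key ++ [c] else key) []
  -- code = message[len(key)::]
  let code := PySem.List.slice cs (some (key.length : Int)) none
  let lenC : Int := code.length
  let lenK : Int := key.length
  -- for j in range(0, lenC, lenC//lenK): temp += code[j:(j+lenC//lenK)] + '\n'
  let temp : List Char := (PySem.List.pyRange 0 lenC (PySem.Int.floordiv lenC lenK)).foldl
      (fun temp j => temp ++ PySem.List.slice code (some j) (some (j + PySem.Int.floordiv lenC lenK)) ++ ['\n']) []
  -- temp = temp.splitlines()
  let temp2 := PySem.Chars.splitlines temp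
  -- for j in range(lenK): index = key.find(str(j)); s += temp[index]
  let s : List Char := (PySem.List.pyRange 0 lenK 1).foldl
      (fun s j => s ++ (PySem.List.pyGet? temp2 (PySem.Chars.find key (PySem.Int.toChars j))).getD []) []
  -- for k in range(len(s)//lenK): result += s[k::len(s)//lenK]
  let result : List Char := (PySem.List.pyRange 0 (PySem.Int.floordiv (s.length : Int) lenK) 1).foldl
      (fun result k => result ++ (PySem.List.slice? s (some k) none (PySem.Int.floordiv (s.length : Int) lenK)).getD []) []
  -- result = result.replace('-','')
  String.ofList (PySem.Chars.replace result ['-'] [])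

-- ===== PORT B =====
-- literal port of Source B
def decodeColumnShuffleCipher_alt (message : String) : String :=
  -- key = ''.join(ch for ch in message if ch.isdigit())
  let key : List Char := message.toList.filter PySem.Chars.isdigit
  -- code = message[len(key):]
  let code := PySem.List.slice message.toList (some (key.length : Int)) none
  -- w = len(code) // len(key)
  let w := PySem.Int.floordiv (code.length : Int) (key.length : Int)
  -- cols = [code[j:j + w] for j in range(0, len(code), w)]
  let cols := (PySem.List.pyRange 0 (code.length : Int) w).map
      (fun j => PySem.List.slice code (some j) (some (j + w)))
  -- s = ''.join(cols[key.find(str(j))] for j in range(len(key)))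
  let s : List Char := ((PySem.List.pyRange 0 (key.length : Int) 1).map
      (fun j => (PySem.List.pyGet? cols (PySem.Chars.find key (PySem.Int.toChars j))).getD [])).flatten
  -- r = len(s) // len(key)
  let r := PySem.Int.floordiv (s.length : Int) (key.length : Int)
  -- order = sorted(range(len(s)), key=lambda p: (p % r, p // r))
  let order := PySem.List.sorted2 (PySem.List.pyRange 0 (s.length : Int) 1)
      (fun p => PySem.Int.mod p r) (fun p => PySem.Int.floordiv p r)
  -- return ''.join(s[p] for p in order if s[p] != '-')
  String.ofList ((order.filter (fun p => PySem.List.pyGetD s p ' ' ≠ '-')).map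
      (fun p => PySem.List.pyGetD s p ' '))

-- ===== PRECONDITION & SPEC =====
-- Pre_ excludes: no digit (A raises ZeroDivisionError), message shorter than twice the key
-- (A raises ValueError: range step 0), and messages containing '\n' or '\r', where A's
-- splitlines-based chunking splits columns at embedded line breaks (and can raise
-- ValueError via a zero slice step); A still returns on some of those, B cuts columns
-- arithmetically there.
def Pre_decodeColumnShuffleCipher (message : String) : Prop :=
  0 < (message.toList.filter PySem.Chars.isdigit).length ∧
  2 * (message.toList.filter PySem.Chars.isdigit).length ≤ message.toList.length ∧
  '\n' ∉ message.toList ∧ '\r' ∉ message.toList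
instance (message : String) : Decidable (Pre_decodeColumnShuffleCipher message) := by
  unfold Pre_decodeColumnShuffleCipher; infer_instance

def pvWitness_decodeColumnShuffleCipher : String := "10abcd"

def Spec_decodeColumnShuffleCipher (message : String) (out : String) : Prop := out = decodeColumnShuffleCipher_alt message
instance (message : String) (out : String) : Decidable (Spec_decodeColumnShuffleCipher message out) := by unfold Spec_decodeColumnShuffleCipher; infer_instance

-- ===== CLAIM (what is proved, stated in full; the proofs are below) =====
def Claim_equal_decodeColumnShuffleCipher : Prop := ∀ (message : String), Dom_decodeColumnShuffleCipher message → Pre_decodeColumnShuffleCipher message → Spec_decodeColumnShuffleCipher message (decodeColumnShuffleCipher message)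

-- ===== LEMMAS AND PROOFS =====

-- lex-lt boolean used by sorted2 (reverse=false)
def myLt (k1 k2 : Int → Int) (a b : Int) : Bool :=
  decide (k1 a < k1 b) || (!decide (k1 b < k1 a) && decide (k2 a < k2 b))

theorem sorted2_unfold (xs : List Int) (k1 k2 : Int → Int) :
    PySem.List.sorted2 xs k1 k2 = xs.foldl (fun acc x => PySem.List.insertBy (myLt k1 k2) x acc) [] := rfl

theorem myLt_asymm (k1 k2 : Int → Int) (a b : Int) (h : myLt k1 k2 a b = true) : myLt k1 k2 b a = false := by
  simp [myLt] at *; omega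

theorem myLt_trans' (k1 k2 : Int → Int) (a b c : Int) (h1 : myLt k1 k2 c b = false)
    (h2 : myLt k1 k2 a b = true) : myLt k1 k2 c a = false := by
  simp [myLt] at *; omega

-- insertBy with myLt preserves weak sortedness
theorem pairwise_insertBy (k1 k2 : Int → Int) (x : Int) (ys : List Int)
    (h : ys.Pairwise (fun a b => myLt k1 k2 b a = false)) :
    (PySem.List.insertBy (myLt k1 k2) x ys).Pairwise (fun a b => myLt k1 k2 b a = false) := by
  induction ys with
  | nil => simp [PySem.List.insertBy]
  | cons y ys ih =>
    rw [List.pairwise_cons] at h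
    by_cases hxy : myLt k1 k2 x y = true
    · show (PySem.List.insertBy (myLt k1 k2) x (y :: ys)).Pairwise _
      simp only [PySem.List.insertBy, hxy, if_pos]
      refine List.Pairwise.cons ?_ (List.Pairwise.cons h.1 h.2)
      intro z hz
      rw [List.mem_cons] at hz
      rcases hz with rfl | hz
      · exact myLt_asymm _ _ _ _ hxy
      · exact myLt_trans' k1 k2 x y z (h.1 z hz) hxy
    · simp only [PySem.List.insertBy, hxy, if_neg, Bool.false_eq_true, not_false_iff]
      refine List.Pairwise.cons ?_ (ih h.2)
      intro z hz
      rw [PySem.List.mem_insertBy] at hz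
      rcases hz with rfl | hz
      · simpa using hxy
      · exact h.1 z hz

theorem eq_of_perm_sorted (k1 k2 : Int → Int) (ys : List Int) :
    ∀ zs : List Int, zs.Perm ys →
    ys.Pairwise (fun a b => myLt k1 k2 a b = true) →
    zs.Pairwise (fun a b => myLt k1 k2 b a = false) → zs = ys := by
  induction ys with
  | nil => intro zs hp _ _; exact hp.eq_nil
  | cons a ys ih =>
    intro zs hp hys hzs
    match zs, hp with
    | [], hp => exact absurd hp.symm (by simp)
    | b :: zs', hp =>
      have hb : b = a := by
        by_contra hne
        have hbmem : b ∈ a :: ys := hp.mem_iff.mp (by simp)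
        have hb2 : b ∈ ys := by
          rcases List.mem_cons.mp hbmem with h | h
          · exact absurd h hne
          · exact h
        have h1 : myLt k1 k2 a b = true := (List.pairwise_cons.mp hys).1 b hb2
        have hamem : a ∈ b :: zs' := hp.symm.mem_iff.mp (by simp)
        have ha2 : a ∈ zs' := by
          rcases List.mem_cons.mp hamem with h | h
          · exact absurd h.symm hne
          · exact h
        have h2 : myLt k1 k2 a b = false := (List.pairwise_cons.mp hzs).1 a ha2
        simp [h1] at h2
      subst hb
      have := ih zs' (hp.cons_inv) (List.pairwise_cons.mp hys).2 (List.pairwise_cons.mp hzs).2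
      rw [this]

theorem foldl_insertBy_pairwise (k1 k2 : Int → Int) (xs : List Int) :
    ∀ acc : List Int, acc.Pairwise (fun a b => myLt k1 k2 b a = false) →
    (xs.foldl (fun acc x => PySem.List.insertBy (myLt k1 k2) x acc) acc).Pairwise
      (fun a b => myLt k1 k2 b a = false) := by
  induction xs with
  | nil => intro acc h; exact h
  | cons x xs ih => intro acc h; exact ih _ (pairwise_insertBy k1 k2 x acc h)

theorem sorted2_eq_of_perm_of_pairwise (xs ys : List Int) (k1 k2 : Int → Int)
    (hp : ys.Perm xs)
    (hs : ys.Pairwise (fun a b => myLt k1 k2 a b = true)) :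
    PySem.List.sorted2 xs k1 k2 = ys := by
  have h1 : (PySem.List.sorted2 xs k1 k2).Perm ys :=
    (PySem.List.sorted2_perm xs k1 k2 false).trans hp.symm
  have h2 := foldl_insertBy_pairwise k1 k2 xs [] (by simp)
  rw [← sorted2_unfold] at h2
  exact eq_of_perm_sorted k1 k2 ys _ h1 hs h2

def pvIsB (c : Char) : Bool :=
  have n := c.toNat
  decide (n = 10) || decide (n = 13) || decide (n = 11) || decide (n = 12) || decide (n = 28) ||
    decide (n = 29) || decide (n = 30) || decide (n = 133) || decide (n = 8232) || decide (n = 8233)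

theorem splitlines_eq_go (s : List Char) :
    PySem.Chars.splitlines s = PySem.Chars.splitlines.go pvIsB s [] [] := rfl

theorem go_cons_nobreak (c : Char) (hc : pvIsB c = false) (hcr : c ≠ '\r')
    (l cur : List Char) (acc : List (List Char)) :
    PySem.Chars.splitlines.go pvIsB (c :: l) cur acc =
      PySem.Chars.splitlines.go pvIsB l (c :: cur) acc := by
  rw [PySem.Chars.splitlines.go.eq_def]
  split
  all_goals simp_all

theorem go_nobreak (xs : List Char) (hx : ∀ c ∈ xs, pvIsB c = false) :
    ∀ (ys cur : List Char) (acc : List (List Char)),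
    PySem.Chars.splitlines.go pvIsB (xs ++ ys) cur acc =
      PySem.Chars.splitlines.go pvIsB ys (xs.reverse ++ cur) acc := by
  induction xs with
  | nil => intro ys cur acc; simp
  | cons c t ih =>
    intro ys cur acc
    have hc : pvIsB c = false := hx c (by simp)
    have hcr : c ≠ '\r' := by rintro rfl; simp [pvIsB] at hc
    rw [List.cons_append, go_cons_nobreak c hc hcr, ih (fun c h => hx c (by simp [h])) ys (c :: cur) acc]
    simp

theorem go_newline (ys cur : List Char) (acc : List (List Char)) :
    PySem.Chars.splitlines.go pvIsB ('\n' :: ys) cur acc =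
      PySem.Chars.splitlines.go pvIsB ys [] (cur.reverse :: acc) := by
  simp [PySem.Chars.splitlines.go, pvIsB]

theorem go_chunks (chunks : List (List Char))
    (h : ∀ l ∈ chunks, ∀ c ∈ l, pvIsB c = false) :
    ∀ acc, PySem.Chars.splitlines.go pvIsB (chunks.flatMap (fun x => x ++ ['\n'])) [] acc =
      acc.reverse ++ chunks := by
  induction chunks with
  | nil => intro acc; simp [PySem.Chars.splitlines.go]
  | cons x rest ih =>
    intro acc
    have hx : ∀ c ∈ x, pvIsB c = false := h x (by simp)
    rw [List.flatMap_cons, List.append_assoc, go_nobreak x hx, List.append_nil, List.singleton_append,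
      go_newline, ih (fun l hl => h l (by simp [hl]))]
    simp

theorem splitlines_chunks (chunks : List (List Char))
    (h : ∀ l ∈ chunks, ∀ c ∈ l, pvIsB c = false) :
    PySem.Chars.splitlines (chunks.flatMap (fun x => x ++ ['\n'])) = chunks := by
  rw [splitlines_eq_go, go_chunks chunks h []]; rfl

-- find.go bound
theorem findgo_bound (sub : List Char) (hsub : sub ≠ []) :
    ∀ (s : List Char) (k : Nat), PySem.Chars.find.go sub s k = -1 ∨
      ((k : Int) ≤ PySem.Chars.find.go sub s k ∧
       PySem.Chars.find.go sub s k + sub.length ≤ k + s.length) := by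
  intro s
  induction s with
  | nil => intro k; left; simp [PySem.Chars.find.go, List.isEmpty_iff, hsub]
  | cons c t ih =>
    intro k
    by_cases hp : sub.isPrefixOf (c :: t) = true
    · right
      have hlen : sub.length ≤ (c :: t).length :=
        (List.isPrefixOf_iff_prefix.mp hp).length_le
      simp only [PySem.Chars.find.go, hp, if_pos]
      constructor
      · exact le_refl _
      · push_cast; omega
    · have : PySem.Chars.find.go sub (c :: t) k = PySem.Chars.find.go sub t (k + 1) := by
        simp only [PySem.Chars.find.go, hp]
        simp
      rw [this]
      rcases ih (k + 1) with h | h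
      · left; exact h
      · right; push_cast at *; constructor <;> [omega; (simp; omega)]

theorem find_bound (key sub : List Char) (hsub : sub ≠ []) :
    PySem.Chars.find key sub = -1 ∨
      (0 ≤ PySem.Chars.find key sub ∧
       PySem.Chars.find key sub + sub.length ≤ key.length) := by
  have := findgo_bound sub hsub key 0
  simpa [PySem.Chars.find] using this

-- toChars nonempty
theorem toDigitsCore_ne_nil : ∀ (fuel n : Nat) (acc : List Char), acc ≠ [] →
    Nat.toDigitsCore 10 fuel n acc ≠ [] := by
  intro fuel
  induction fuel with
  | zero => intro n acc h; exact h
  | succ f ih =>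
    intro n acc h
    rw [Nat.toDigitsCore.eq_def]
    simp only
    split
    · simp
    · exact ih _ _ (by simp)

theorem toDigits_ne_nil (n : Nat) : Nat.toDigits 10 n ≠ [] := by
  rw [Nat.toDigits, Nat.toDigitsCore.eq_def]
  simp only
  split
  · simp
  · exact toDigitsCore_ne_nil _ _ _ (by simp)

theorem toChars_ne_nil (j : Int) : PySem.Int.toChars j ≠ [] := by
  unfold PySem.Int.toChars
  split
  · simp
  · exact toDigits_ne_nil _

-- replace by singleton with empty new = filter
theorem replacego_filter : ∀ (fuel : Nat) (l : List Char) (acc : List Char), l.length ≤ fuel →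
    PySem.Chars.replace.go ['-'] [] fuel l acc = acc.reverse ++ l.filter (· ≠ '-') := by
  intro fuel
  induction fuel with
  | zero => intro l acc h; rw [List.length_eq_zero_iff.mp (Nat.le_zero.mp h)]; simp [PySem.Chars.replace.go]
  | succ n ih =>
    intro l acc h
    cases l with
    | nil => simp [PySem.Chars.replace.go]
    | cons c t =>
      by_cases hc : c = '-'
      · subst hc
        have hp : (['-'] : List Char).isPrefixOf ('-' :: t) = true := by simp [List.isPrefixOf]
        simp only [PySem.Chars.replace.go, hp, if_pos]
        show PySem.Chars.replace.go ['-'] [] n t acc = _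
        rw [ih t acc (by simpa using h)]
        simp
      · have hp : (['-'] : List Char).isPrefixOf (c :: t) = false := by
          simp [List.isPrefixOf]; exact fun h => absurd h.symm hc
        simp only [PySem.Chars.replace.go, hp]
        simp only [Bool.false_eq_true, if_false]
        rw [ih t (c :: acc) (by simpa using h)]
        simp [hc]

theorem replace_filter (l : List Char) :
    PySem.Chars.replace l ['-'] [] = l.filter (· ≠ '-') := by
  simp [PySem.Chars.replace, replacego_filter l.length l [] (le_refl _)]

-- slice? with positive step, in-range nonneg start, no stop
theorem slice?_stride {α : Type} (xs : List α) (k R : Int) (hk0 : 0 ≤ k) (hkn : k < xs.length)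
    (hR : 0 < R) :
    PySem.List.slice? xs (some k) none R =
      some ((List.range ((((xs.length : Int) - k + R - 1) / R).toNat)).filterMap
        (fun (t : Nat) => xs[(k + R * (t : Int)).toNat]?)) := by
  unfold PySem.List.slice? PySem.List.sliceIndices
  have h1 : ¬ (R = 0) := by omega
  have h2 : ¬ (R < 0) := by omega
  simp only [h1, h2, if_false]
  have hcl : (if k < 0 then max (k + (xs.length : Int)) 0 else min k (xs.length : Int)) = k := by
    rw [if_neg (by omega)]; omega
  rw [hcl, if_pos hR, if_pos hkn]

theorem filterMap_eq_map_of_forall {α β : Type} (l : List α) (f : α → Option β) (g : α → β)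
    (h : ∀ x ∈ l, f x = some (g x)) : l.filterMap f = l.map g := by
  induction l with
  | nil => simp
  | cons x t ih =>
    rw [List.filterMap_cons, h x (by simp), List.map_cons, ih (fun y hy => h y (by simp [hy]))]

-- filterMap of in-range getElem? = map of pyGetD
theorem filterMap_getElem_eq_map_pyGetD {α : Type} (xs : List α) (d : α) (cnt : Nat) (g : Nat → Int)
    (h : ∀ t < cnt, 0 ≤ g t ∧ g t < xs.length) :
    (List.range cnt).filterMap (fun t => xs[(g t).toNat]?) =
      (List.range cnt).map (fun t => PySem.List.pyGetD xs (g t) d) := by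
  apply filterMap_eq_map_of_forall
  intro t ht
  rw [List.mem_range] at ht
  obtain ⟨h0, hlt⟩ := h t ht
  have hn : (g t).toNat < xs.length := by omega
  rw [List.getElem?_eq_getElem hn]
  congr 1
  unfold PySem.List.pyGetD PySem.List.pyGet? PySem.List.pyIdx?
  rw [if_pos h0, if_pos (by omega)]
  simp [List.getElem?_eq_getElem hn]

-- flatten length at least number of nonempty blocks
theorem length_flatMap_ge {α β : Type} (l : List α) (g : α → List β)
    (h : ∀ x ∈ l, g x ≠ []) : l.length ≤ (l.flatMap g).length := by
  induction l with
  | nil => simp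
  | cons x t ih =>
    simp only [List.flatMap_cons, List.length_append, List.length_cons]
    have h1 : 1 ≤ (g x).length := List.length_pos_iff.mpr (h x (by simp))
    have h2 := ih (fun y hy => h y (by simp [hy]))
    omega

theorem mod_pos_eq (k R t : Int) (h0 : 0 ≤ k) (h : k < R) :
    PySem.Int.mod (k + R * t) R = k := by
  unfold PySem.Int.mod
  rw [Int.fmod_eq_emod, if_pos (Or.inl (by omega)), add_zero,
    Int.add_mul_emod_self_left, Int.emod_eq_of_lt h0 h]

theorem fdiv_pos_eq (k R t : Int) (h0 : 0 ≤ k) (h : k < R) :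
    PySem.Int.floordiv (k + R * t) R = t := by
  unfold PySem.Int.floordiv
  rw [Int.fdiv_eq_ediv, if_pos (Or.inl (by omega)), sub_zero,
    Int.add_mul_ediv_left _ _ (by omega : R ≠ 0), Int.ediv_eq_zero_of_lt h0 h, zero_add]

theorem fdiv_nonneg_eq (a b : Int) (h0 : 0 ≤ b) : PySem.Int.floordiv a b = a / b := by
  unfold PySem.Int.floordiv
  rw [Int.fdiv_eq_ediv, if_pos (Or.inl h0), sub_zero]


def pvPint (n R : Int) : List Int :=
  (PySem.List.pyRange 0 R 1).flatMap
    (fun k => (List.range (((n - k + R - 1) / R).toNat)).map (fun (t : Nat) => k + R * (t : Int)))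

theorem pvPint_pairwise (n R : Int) (_hR : 0 < R) :
    (pvPint n R).Pairwise (fun a b =>
      myLt (fun p => PySem.Int.mod p R) (fun p => PySem.Int.floordiv p R) a b = true) := by
  unfold pvPint
  rw [List.pairwise_flatMap]
  constructor
  · intro k hk
    rw [PySem.List.mem_pyRange_one] at hk
    rw [List.pairwise_map]
    apply List.Pairwise.imp ?_ (List.pairwise_lt_range)
    intro t t' hlt
    simp only [myLt, mod_pos_eq k R _ hk.1 hk.2, fdiv_pos_eq k R _ hk.1 hk.2]
    have : (t : Int) < (t' : Int) := by exact_mod_cast hlt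
    simp [this]
  · have hpw := PySem.List.pairwise_lt_pyRange_one 0 R
    apply List.Pairwise.imp_of_mem ?_ hpw
    intro k k' hk hk' hkk
    rw [PySem.List.mem_pyRange_one] at hk hk'
    intro x hx y hy
    simp only [List.mem_map, List.mem_range] at hx hy
    obtain ⟨t, _, rfl⟩ := hx
    obtain ⟨t', _, rfl⟩ := hy
    simp only [myLt, mod_pos_eq k R _ hk.1 hk.2, mod_pos_eq k' R _ hk'.1 hk'.2]
    simp [hkk]

theorem pvPint_mem (n R : Int) (hR : 0 < R) (x : Int) :
    x ∈ pvPint n R ↔ 0 ≤ x ∧ x < n := by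
  unfold pvPint
  rw [List.mem_flatMap]
  constructor
  · rintro ⟨k, hk, hx⟩
    rw [PySem.List.mem_pyRange_one] at hk
    simp only [List.mem_map, List.mem_range] at hx
    obtain ⟨t, ht, rfl⟩ := hx
    have h1 : ((n - k + R - 1) / R) * R ≤ n - k + R - 1 := Int.ediv_mul_le _ (by omega)
    have h2 : (t : Int) ≤ (n - k + R - 1) / R - 1 := by
      have : (t : Int) < ((n - k + R - 1) / R).toNat := by exact_mod_cast ht
      omega
    have h3 : R * (t : Int) ≤ R * ((n - k + R - 1) / R - 1) :=
      mul_le_mul_of_nonneg_left h2 (by omega)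
    constructor
    · have : (0:Int) ≤ R * (t : Int) := by positivity
      omega
    · nlinarith [h1]
  · rintro ⟨h0, hn⟩
    refine ⟨x % R, PySem.List.mem_pyRange_one.mpr ⟨Int.emod_nonneg x (by omega), Int.emod_lt_of_pos x hR⟩, ?_⟩
    simp only [List.mem_map, List.mem_range]
    refine ⟨(x / R).toNat, ?_, ?_⟩
    · have hd0 : 0 ≤ x / R := Int.ediv_nonneg h0 (by omega)
      have hth : x / R ≤ (n - x % R - 1) / R := by
        rw [Int.le_ediv_iff_mul_le hR]
        have := Int.emod_add_ediv x R
        nlinarith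
      have hsplit : (n - x % R + R - 1) / R = (n - x % R - 1) / R + 1 := by
        have he : n - x % R + R - 1 = (n - x % R - 1) + 1 * R := by ring
        rw [he, Int.add_mul_ediv_right _ _ (by omega : R ≠ 0)]
      omega
    · have hd0 : 0 ≤ x / R := Int.ediv_nonneg h0 (by omega)
      have := Int.emod_add_ediv x R
      rw [Int.toNat_of_nonneg hd0]
      omega
theorem splitlines_map {α : Type} (l : List α) (g : α → List Char)
    (h : ∀ j ∈ l, ∀ c ∈ g j, pvIsB c = false) :
    PySem.Chars.splitlines (l.flatMap (fun j => g j ++ ['\n'])) = l.map g := by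
  have he : l.flatMap (fun j => g j ++ ['\n']) = (l.map g).flatMap (fun x => x ++ ['\n']) := by
    rw [List.flatMap_map]
  rw [he, splitlines_chunks]
  intro x hx
  rw [List.mem_map] at hx
  obtain ⟨j, hj, rfl⟩ := hx
  exact h j hj

theorem char_eq_of_toNat (a b : Char) (h : a.toNat = b.toNat) : a = b := by
  apply Char.ext; unfold Char.toNat at h; exact UInt32.toNat_inj.mp h

theorem pvIsB_false_of (c : Char) (hdom : pvDomChar c = true) (h1 : c ≠ '\n') (h2 : c ≠ '\r') :
    pvIsB c = false := by
  have hn1 : c.toNat ≠ 10 := fun h => h1 (char_eq_of_toNat _ _ (by simpa using h))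
  have hn2 : c.toNat ≠ 13 := fun h => h2 (char_eq_of_toNat _ _ (by simpa using h))
  simp only [pvDomChar, Bool.or_eq_true, Bool.and_eq_true, decide_eq_true_eq, beq_iff_eq] at hdom
  simp only [pvIsB, Bool.or_eq_false_iff, decide_eq_false_iff_not]
  omega



theorem flatMap_congr_mem {α β : Type} (l : List α) (f g : α → List β)
    (h : ∀ x ∈ l, f x = g x) : l.flatMap f = l.flatMap g := by
  induction l with
  | nil => rfl
  | cons x t ih => rw [List.flatMap_cons, List.flatMap_cons, h x (by simp), ih (fun y hy => h y (by simp [hy]))]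

theorem pyGet?_inrange {α : Type} (xs : List α) (i : Int)
    (h1 : -(xs.length : Int) ≤ i) (h2 : i < xs.length) :
    ∃ x ∈ xs, PySem.List.pyGet? xs i = some x := by
  unfold PySem.List.pyGet? PySem.List.pyIdx?
  by_cases h0 : 0 ≤ i
  · rw [if_pos h0, if_pos h2]
    have hlt : i.toNat < xs.length := by omega
    exact ⟨xs[i.toNat], List.getElem_mem hlt, by simp [List.getElem?_eq_getElem hlt]⟩
  · rw [if_neg h0, if_pos (by omega)]
    have hlt : xs.length - (-i).toNat < xs.length := by omega
    exact ⟨xs[xs.length - (-i).toNat], List.getElem_mem hlt, by simp [List.getElem?_eq_getElem hlt]⟩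

theorem pos_bound (n R : Int) (k : Int) (t : Nat) (hR : 0 < R) (hk : 0 ≤ k)
    (ht : t < ((n - k + R - 1) / R).toNat) : 0 ≤ k + R * (t : Int) ∧ k + R * (t : Int) < n := by
  have h1 : ((n - k + R - 1) / R) * R ≤ n - k + R - 1 := Int.ediv_mul_le _ (by omega)
  have h2 : (t : Int) ≤ (n - k + R - 1) / R - 1 := by
    have : (t : Int) < ((n - k + R - 1) / R).toNat := by exact_mod_cast ht
    omega
  have h3 : R * (t : Int) ≤ R * ((n - k + R - 1) / R - 1) := mul_le_mul_of_nonneg_left h2 (by omega)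
  have h4 : (0:Int) ≤ R * (t : Int) := by positivity
  constructor
  · omega
  · nlinarith [h1]

theorem pvPint_nodup (n R : Int) (hR : 0 < R) : (pvPint n R).Nodup := by
  apply List.Pairwise.imp ?_ (pvPint_pairwise n R hR)
  intro a b h
  rintro rfl
  simp [myLt] at h

theorem pvPint_perm (n R : Int) (hR : 0 < R) :
    (pvPint n R).Perm (PySem.List.pyRange 0 n 1) := by
  rw [List.perm_ext_iff_of_nodup (pvPint_nodup n R hR) (PySem.List.nodup_pyRange_one 0 n)]
  intro a
  rw [pvPint_mem n R hR, PySem.List.mem_pyRange_one]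

theorem sorted2_pyRange_eq_pvPint (n R : Int) (hR : 0 < R) :
    PySem.List.sorted2 (PySem.List.pyRange 0 n 1)
      (fun p => PySem.Int.mod p R) (fun p => PySem.Int.floordiv p R) = pvPint n R := by
  apply sorted2_eq_of_perm_of_pairwise
  · exact pvPint_perm n R hR
  · exact pvPint_pairwise n R hR

theorem pv_witness_ok :
    Dom_decodeColumnShuffleCipher pvWitness_decodeColumnShuffleCipher ∧
    Pre_decodeColumnShuffleCipher pvWitness_decodeColumnShuffleCipher := by decide

theorem flatten_map_eq_flatMap {α β : Type} (l : List α) (f : α → List β) :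
    (l.map f).flatten = l.flatMap f := by
  simp [List.flatMap_def]

-- ===== VERDICT (by name: the statement is the Claim_ definition above) =====
theorem decodeColumnShuffleCipher_spec : Claim_equal_decodeColumnShuffleCipher := by
  intro m hdom hpre
  unfold Spec_decodeColumnShuffleCipher
  obtain ⟨hk, hlen, hnl, hcr⟩ := hpre
  have hdomc : ∀ c ∈ m.toList, pvDomChar c = true := by
    unfold Dom_decodeColumnShuffleCipher pvDomStr at hdom
    rw [List.all_eq_true] at hdom
    intro c hc; exact hdom c hc
  unfold decodeColumnShuffleCipher decodeColumnShuffleCipher_alt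
  simp only [PySem.List.foldl_append_if_eq_filter, List.nil_append]
  set cs := m.toList with hcs
  set key := cs.filter PySem.Chars.isdigit with hkeydef
  set K := key.length with hK
  have hKpos : 0 < K := hk
  have hKlen : K ≤ cs.length := by rw [hK, hkeydef]; exact List.length_filter_le _ _
  set code := PySem.List.slice cs (some (K : Int)) none with hcodedef
  have hcodeeq : code = cs.drop K := by rw [hcodedef, PySem.List.slice_from_natCast]
  set n := code.length with hn
  have hnval : n = cs.length - K := by rw [hn, hcodeeq, List.length_drop]
  have hKn : K ≤ n := by omega
  set W := n / K with hW
  have hWpos : 0 < W := (Nat.one_le_div_iff hKpos).mpr hKn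
  have hwfd : PySem.Int.floordiv (n : Int) (K : Int) = (W : Int) := by
    rw [fdiv_nonneg_eq _ _ (by positivity), hW, Int.natCast_ediv]
  rw [hwfd]
  have hKW : K * W ≤ n := by rw [hW]; exact Nat.mul_div_le n K
  have hbreak : ∀ j ∈ PySem.List.pyRange 0 (n : Int) (W : Int),
      ∀ c ∈ PySem.List.slice code (some j) (some (j + (W : Int))), pvIsB c = false := by
    intro j _ c hcmem
    have hccode : c ∈ code := PySem.List.mem_of_mem_slice code _ _ hcmem
    have hccs : c ∈ cs := by
      rw [hcodeeq] at hccode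
      exact List.mem_of_mem_drop hccode
    exact pvIsB_false_of c (hdomc c hccs) (fun h => hnl (h ▸ hccs)) (fun h => hcr (h ▸ hccs))
  simp only [List.append_assoc, PySem.List.foldl_append_eq_flatMap, List.nil_append]
  rw [splitlines_map _ _ hbreak]
  simp only [flatten_map_eq_flatMap]
  set cols := (PySem.List.pyRange 0 (n : Int) (W : Int)).map
      (fun j => PySem.List.slice code (some j) (some (j + (W : Int)))) with hcolsdef
  set sArr := (PySem.List.pyRange 0 (K : Int) 1).flatMap
      (fun x => (PySem.List.pyGet? cols (PySem.Chars.find key (PySem.Int.toChars x))).getD []) with hsdef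
  -- cols length
  have hnpos : 0 < n := by
    calc 0 < K := hKpos
    _ ≤ n := hKn
  have hcolslen : K ≤ cols.length := by
    rw [hcolsdef, List.length_map, PySem.List.pyRange_of_pos 0 (n:Int) (by exact_mod_cast hWpos),
      List.length_map, List.length_range, if_pos (by exact_mod_cast hnpos)]
    have h1 : (K : Int) ≤ ((n : Int) - 0 + (W : Int) - 1) / (W : Int) := by
      rw [Int.le_ediv_iff_mul_le (by exact_mod_cast hWpos)]
      have : (K : Int) * (W : Int) ≤ (n : Int) := by exact_mod_cast hKW
      omega
    omega
  have hcolsne : ∀ col ∈ cols, col ≠ [] := by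
    rw [hcolsdef]
    intro col hcol
    rw [List.mem_map] at hcol
    obtain ⟨j, hj, rfl⟩ := hcol
    rw [PySem.List.mem_pyRange_iff_of_pos (by exact_mod_cast hWpos)] at hj
    rw [PySem.List.slice_toNat code hj.1 (by omega)]
    have hjn : j.toNat < n := by omega
    have hwt : j.toNat < (j + (W:Int)).toNat := by omega
    intro hemp
    have := congrArg List.length hemp
    rw [List.length_take, List.length_drop] at this
    simp only [List.length_nil] at this
    omega
  -- each selected column is a real nonempty column
  have hcolpos : 0 < cols.length := lt_of_lt_of_le hKpos hcolslen
  have hgne : ∀ j ∈ PySem.List.pyRange 0 (K : Int) 1,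
      (PySem.List.pyGet? cols (PySem.Chars.find key (PySem.Int.toChars j))).getD [] ≠ [] := by
    intro j _
    have hfb := find_bound key (PySem.Int.toChars j) (toChars_ne_nil j)
    have hsub : 0 < (PySem.Int.toChars j).length := List.length_pos_iff.mpr (toChars_ne_nil j)
    have hsub1 : (1:Int) ≤ ((PySem.Int.toChars j).length : Int) := by exact_mod_cast hsub
    have hc1 : (1:Int) ≤ (cols.length : Int) := by exact_mod_cast hcolpos
    have hcK : (K : Int) ≤ (cols.length : Int) := by exact_mod_cast hcolslen
    have hKk : (key.length : Int) = (K : Int) := by rw [hK]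
    have hinr : ∃ x ∈ cols, PySem.List.pyGet? cols (PySem.Chars.find key (PySem.Int.toChars j)) = some x := by
      apply pyGet?_inrange
      · rcases hfb with h | h <;> omega
      · rcases hfb with h | h <;> omega
    obtain ⟨x, hx, heq⟩ := hinr
    rw [heq]
    exact hcolsne x hx
  have hslen : K ≤ sArr.length := by
    have h1 := length_flatMap_ge (PySem.List.pyRange 0 (K : Int) 1)
      (fun x => (PySem.List.pyGet? cols (PySem.Chars.find key (PySem.Int.toChars x))).getD []) hgne
    rw [PySem.List.length_pyRange_one] at h1
    have h2 : ((K:Int) - 0).toNat = K := by omega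
    rw [h2] at h1
    exact h1
  set nS := sArr.length with hnS
  set R := nS / K with hR
  have hRpos : 0 < R := (Nat.one_le_div_iff hKpos).mpr hslen
  have hRle : R ≤ nS := Nat.div_le_self _ _
  have hRfd : PySem.Int.floordiv (nS : Int) (K : Int) = (R : Int) := by
    rw [fdiv_nonneg_eq _ _ (by positivity), hR, Int.natCast_ediv]
  rw [hRfd]
  have hRposI : (0:Int) < (R:Int) := by exact_mod_cast hRpos
  have hRnS : (R:Int) ≤ (nS:Int) := by exact_mod_cast hRle
  have hAres : (PySem.List.pyRange 0 (R:Int) 1).flatMap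
      (fun x => (PySem.List.slice? sArr (some x) none (R:Int)).getD []) =
      (pvPint (nS:Int) (R:Int)).map (fun p => PySem.List.pyGetD sArr p ' ') := by
    unfold pvPint
    rw [List.map_flatMap]
    apply flatMap_congr_mem
    intro k hkm
    rw [PySem.List.mem_pyRange_one] at hkm
    obtain ⟨hk0, hkR⟩ := hkm
    have hknS : k < (sArr.length : Int) := by
      have : (nS : Int) = (sArr.length : Int) := by rw [hnS]
      omega
    rw [slice?_stride sArr k (R:Int) hk0 hknS hRposI, Option.getD_some, List.map_map]
    rw [filterMap_getElem_eq_map_pyGetD sArr ' '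
      ((((sArr.length : Int) - k + (R:Int) - 1) / (R:Int)).toNat) (fun t => k + (R:Int) * (t:Int)) ?_]
    · rfl
    · intro t ht
      have hb := pos_bound (nS:Int) (R:Int) k t hRposI hk0 (by
        have : (nS : Int) = (sArr.length : Int) := by rw [hnS]
        rw [this]; exact ht)
      have : (nS : Int) = (sArr.length : Int) := by rw [hnS]
      omega
  rw [replace_filter, hAres, sorted2_pyRange_eq_pvPint (nS:Int) (R:Int) hRposI, List.filter_map]
  rfl
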